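-- pv_equiv track=rewrite | github.com/MrHamdulay/csc3-capstone | examples/data/Assignment_8/mkhnel011/question2.py | pair_count
-- ===== SOURCE A (Python) =====
-- count = 0
--
-- def pair_count(s):
--     """ to check if the len of the string is less than two characters"""
--     if len(s) == 0 or len(s) ==1:
--         return 0
--     else:
--         """check if the first character is equal to the second character"""
--         if s[0] == s[1]:
--             return (count+1) + pair_count(s[2:])
--         else:
--             return count + pair_count(s[1:])
--     """printing out the number of pairs"""
-- ===== SOURCE B (Python) =====
-- def pair_count(s):
--     total = 0
--     run = 0
--     cur = None
--     for c in s: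
--         if run > 0 and c == cur:
--             run += 1
--         else:
--             total += run // 2
--             cur = c
--             run = 1
--     total += run // 2
--     return total
-- ===== Notes on version B (the rewrite author's own statement) =====
-- stated objective: faster
-- what changed: Replaces A's per-character greedy recursion (compare s[0],s[1], recurse on a slice dropping 1 or 2 chars) with a single iterative run-length pass adding run//2 per maximal run of equal characters.
import Mathlib
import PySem

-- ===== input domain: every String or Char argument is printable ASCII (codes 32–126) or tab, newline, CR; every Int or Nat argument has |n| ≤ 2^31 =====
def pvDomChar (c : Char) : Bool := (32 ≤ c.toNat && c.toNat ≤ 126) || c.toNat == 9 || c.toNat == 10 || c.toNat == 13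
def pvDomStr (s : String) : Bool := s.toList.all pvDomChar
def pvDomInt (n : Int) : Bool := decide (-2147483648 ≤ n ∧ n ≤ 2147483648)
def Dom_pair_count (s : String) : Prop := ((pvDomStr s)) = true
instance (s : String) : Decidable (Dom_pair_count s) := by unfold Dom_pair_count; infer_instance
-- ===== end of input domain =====

-- B replaces A's per-character greedy recursion with a single run-length pass adding run//2
-- per maximal run (objective: alternative, same asymptotic cost in Lean terms).

-- ===== PORT A =====
-- A recurses on the string: if the first two characters are equal, count 1 and drop both,
-- else drop one; recursion on the char list is exact for the return value.
def pvPairA : List Char → Int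
  | [] => 0
  | [_] => 0
  | a :: b :: t => if a == b then (0 + 1) + pvPairA t else 0 + pvPairA (b :: t)

def pair_count (s : String) : Int := pvPairA s.toList

-- ===== PORT B =====
-- single pass over the characters keeping (total, run, cur); run // 2 is Python's floor division
def pvLoopB : List Char → Int → Int → Option Char → Int
  | [], total, run, _ => total + PySem.Int.floordiv run 2
  | c :: t, total, run, cur =>
    if 0 < run ∧ cur = some c then pvLoopB t total (run + 1) cur
    else pvLoopB t (total + PySem.Int.floordiv run 2) 1 (some c)

def pair_count_alt (s : String) : Int := pvLoopB s.toList 0 0 none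

-- ===== PRECONDITION & SPEC =====
def Spec_pair_count (s : String) (out : Int) : Prop := out = pair_count_alt s
instance (s : String) (out : Int) : Decidable (Spec_pair_count s out) := by unfold Spec_pair_count; infer_instance

-- ===== CLAIM (what is proved, stated in full; the proofs are below) =====
def Claim_equal_pair_count : Prop := ∀ (s : String), Dom_pair_count s → Spec_pair_count s (pair_count s)

-- ===== LEMMAS AND PROOFS =====

-- a full run of n equal characters contributes n / 2 pairs under A's greedy pairing
theorem pvPairA_replicate (c : Char) (n : Nat) :
    pvPairA (List.replicate n c) = ((n / 2 : Nat) : Int) := by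
  induction n using Nat.twoStepInduction with
  | zero => simp [pvPairA]
  | one => simp [pvPairA]
  | more n ih _ =>
    have : List.replicate (n + 2) c = c :: c :: List.replicate n c := by
      simp [List.replicate_succ]
    rw [this]
    simp only [pvPairA, beq_self_eq_true, if_true, ih]
    have : (n + 2) / 2 = n / 2 + 1 := by omega
    rw [this]; push_cast; ring

-- a run followed by a different character contributes n / 2 pairs and the rest pairs greedily on its own
theorem pvPairA_run_break (c d : Char) (n : Nat) (t : List Char) (h : c ≠ d) :
    pvPairA (List.replicate n c ++ d :: t) = ((n / 2 : Nat) : Int) + pvPairA (d :: t) := by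
  induction n using Nat.twoStepInduction with
  | zero => simp
  | one =>
    have hb : (c == d) = false := by simpa using h
    simp [pvPairA, hb]
  | more n ih _ =>
    have : List.replicate (n + 2) c ++ d :: t = c :: c :: (List.replicate n c ++ d :: t) := by
      simp [List.replicate_succ]
    rw [this]
    simp only [pvPairA, beq_self_eq_true, if_true, ih]
    have : (n + 2) / 2 = n / 2 + 1 := by omega
    rw [this]; push_cast; ring

-- core invariant of B's loop: state (total, run = n+1, cur) equals total plus A's count
-- on the pending run prepended to the remaining characters
theorem pvLoopB_invariant (t : List Char) :
    ∀ (n : Nat) (c : Char) (total : Int),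
      pvLoopB t total ((n + 1 : Nat) : Int) (some c)
        = total + pvPairA (List.replicate (n + 1) c ++ t) := by
  induction t with
  | nil =>
    intro n c total
    simp [pvLoopB, pvPairA_replicate]
  | cons d t ih =>
    intro n c total
    by_cases hcd : c = d
    · subst hcd
      have hcond : (0 < ((n + 1 : Nat) : Int) ∧ some c = some c) := by
        constructor
        · exact_mod_cast Nat.succ_pos n
        · rfl
      rw [pvLoopB, if_pos hcond]
      have : ((n + 1 : Nat) : Int) + 1 = ((n + 2 : Nat) : Int) := by push_cast; ring
      rw [this, ih (n + 1) c total]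
      congr 1
      have : List.replicate (n + 1) c ++ c :: t = List.replicate (n + 2) c ++ t := by
        rw [show List.replicate (n + 2) c = List.replicate (n + 1) c ++ [c] by
          simp [List.replicate_succ']]
        simp
      rw [this]
    · have hcond : ¬ (0 < ((n + 1 : Nat) : Int) ∧ some c = some d) := by
        intro ⟨_, h2⟩; exact hcd (Option.some.inj h2)
      rw [pvLoopB, if_neg hcond]
      rw [show (1 : Int) = ((0 + 1 : Nat) : Int) by norm_num]
      rw [ih 0 d (total + PySem.Int.floordiv ((n + 1 : Nat) : Int) 2)]
      rw [pvPairA_run_break c d (n + 1) t hcd]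
      simp
      ring

-- ===== VERDICT (by name: the statement is the Claim_ definition above) =====
theorem pair_count_spec : Claim_equal_pair_count := by
  intro s _
  unfold Spec_pair_count pair_count pair_count_alt
  cases h : s.toList with
  | nil => simp [pvPairA, pvLoopB, PySem.Int.floordiv]
  | cons c t =>
    have hcond : ¬ (0 < (0 : Int) ∧ (none : Option Char) = some c) := by
      intro ⟨h1, _⟩; exact absurd h1 (by norm_num)
    rw [pvLoopB, if_neg hcond]
    rw [show (1 : Int) = ((0 + 1 : Nat) : Int) by norm_num]
    rw [pvLoopB_invariant t 0 c]
    simp [PySem.Int.floordiv]
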